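-- pv_equiv track=rewrite | github.com/unul09/jumpToPython20 | main.py | DashInsert
-- ===== SOURCE A (Python) =====
-- def DashInsert(numbers):
--     result = []
--     for i in range(len(numbers)):
--         result.append(str(numbers[i]))
--         if i == len(numbers) - 1: break
--         if numbers[i] % 2 == 0:
--             if numbers[i + 1] % 2 == 0: result.append('*')
--         else:
--             if numbers[i + 1] % 2 == 1: result.append('-')
--     result = ''.join(result)
--     return result
-- ===== SOURCE B (Python) =====
-- def DashInsert(numbers):
--     # Stage 1: group the numbers into maximal runs of equal parity.
--     runs = []
--     for n in numbers:
--         if runs and runs[-1][-1] % 2 == n % 2: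
--             runs[-1].append(n)
--         else:
--             runs.append([n])
--     # Stage 2: join each run with its parity's separator, concatenate the runs.
--     pieces = []
--     for run in runs:
--         sep = '*' if run[0] % 2 == 0 else '-'
--         pieces.append(sep.join(str(v) for v in run))
--     return ''.join(pieces)
-- ===== Notes on version B (the rewrite author's own statement) =====
-- stated objective: alternative
-- what changed: Replaces A's single index loop with lookahead/break by a two-stage algorithm: first group the numbers into maximal runs of equal parity, then render each run by joining its digits with that parity's separator ('*' for even runs, '-' for odd runs) and concatenate the runs.
import Mathlib
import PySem

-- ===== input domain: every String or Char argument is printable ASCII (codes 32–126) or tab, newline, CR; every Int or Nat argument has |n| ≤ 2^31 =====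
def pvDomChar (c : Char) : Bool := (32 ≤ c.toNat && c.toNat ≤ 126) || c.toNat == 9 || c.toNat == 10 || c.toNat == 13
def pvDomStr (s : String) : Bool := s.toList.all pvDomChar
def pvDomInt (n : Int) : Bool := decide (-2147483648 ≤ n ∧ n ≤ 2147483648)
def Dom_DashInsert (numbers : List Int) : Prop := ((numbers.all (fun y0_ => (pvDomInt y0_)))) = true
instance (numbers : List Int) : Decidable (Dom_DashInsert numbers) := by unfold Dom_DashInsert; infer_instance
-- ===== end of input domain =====

-- B replaces A's single index loop (range/len, lookahead, break) by a two-stage algorithm: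
-- group the numbers into maximal runs of equal parity, then join each run with its parity's
-- separator ('*' for even runs, '-' for odd runs) and concatenate the runs.

-- ===== PORT A =====
-- the for-loop over range(len(numbers)) with its break, ported as recursion over the index list;
-- `result` is the Python list of strings, joined at the end (strings as List Char for kernel transparency)
def DashInsertLoop (numbers : List Int) : List Int → List (List Char) → List (List Char)
  | [], result => result
  | i :: is, result =>
    let result := result ++ [PySem.Int.toChars (PySem.List.pyGetD numbers i 0)]
    if i = PySem.List.len numbers - 1 then result  -- break
    else
      let result :=
        if PySem.Int.mod (PySem.List.pyGetD numbers i 0) 2 = 0 then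
          (if PySem.Int.mod (PySem.List.pyGetD numbers (i + 1) 0) 2 = 0 then result ++ [['*']] else result)
        else
          (if PySem.Int.mod (PySem.List.pyGetD numbers (i + 1) 0) 2 = 1 then result ++ [['-']] else result)
      DashInsertLoop numbers is result

def DashInsert (numbers : List Int) : String :=
  String.ofList (PySem.Chars.join []
    (DashInsertLoop numbers (PySem.List.pyRange 0 (PySem.List.len numbers) 1) []))

-- ===== PORT B =====
-- stage 1 loop body: extend the last run if its last element has n's parity, else start a new run
def DashInsertStep (runs : List (List Int)) (n : Int) : List (List Int) :=
  if runs ≠ [] ∧ PySem.Int.mod ((runs.getLastD []).getLastD 0) 2 = PySem.Int.mod n 2 then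
    runs.dropLast ++ [(runs.getLastD []) ++ [n]]
  else
    runs ++ [[n]]

def DashInsertRuns (numbers : List Int) : List (List Int) :=
  numbers.foldl DashInsertStep []

-- stage 2: sep = '*' if run[0] % 2 == 0 else '-'; piece = sep.join(str(v) for v in run)
def DashInsertRunStr (run : List Int) : List Char :=
  PySem.Chars.join (if PySem.Int.mod (PySem.List.pyGetD run 0 0) 2 = 0 then ['*'] else ['-'])
    (run.map PySem.Int.toChars)

def DashInsert_alt (numbers : List Int) : String :=
  String.ofList (PySem.Chars.join [] ((DashInsertRuns numbers).map DashInsertRunStr))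

-- ===== PRECONDITION & SPEC =====
def Spec_DashInsert (numbers : List Int) (out : String) : Prop := out = DashInsert_alt numbers
instance (numbers : List Int) (out : String) : Decidable (Spec_DashInsert numbers out) := by unfold Spec_DashInsert; infer_instance

-- ===== CLAIM =====
def Claim_equal_DashInsert : Prop := ∀ (numbers : List Int), Dom_DashInsert numbers → Spec_DashInsert numbers (DashInsert numbers)

-- ===== LEMMAS AND PROOFS =====

-- the separator A emits between adjacent elements a, b (proof-side characterisation)
def DashInsertSep (a b : Int) : List Char :=
  if PySem.Int.mod a 2 = 0 ∧ PySem.Int.mod b 2 = 0 then ['*']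
  else if PySem.Int.mod a 2 = 1 ∧ PySem.Int.mod b 2 = 1 then ['-']
  else []

-- common normal form: after the first digit, emit sep-then-digit for every adjacent pair
def pairTail (l : Int) : List Int → List Char
  | [] => []
  | n :: ns => DashInsertSep l n ++ PySem.Int.toChars n ++ pairTail n ns

theorem joinNil (l : List (List Char)) : PySem.Chars.join [] l = l.flatten := by
  simp only [PySem.Chars.join]
  induction l with
  | nil => rfl
  | cons a t ih =>
    cases t with
    | nil => simp [List.intercalate]
    | cons b t' =>
      simp only [List.intercalate, List.intersperse] at ih ⊢
      simp_all

theorem pairTail_eq_zip (rest : List Int) : ∀ (a : Int),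
    pairTail a rest = (((a :: rest).zip rest).map fun p => DashInsertSep p.1 p.2 ++ PySem.Int.toChars p.2).flatten := by
  induction rest with
  | nil => intro a; rfl
  | cons b t ih =>
    intro a
    simp only [pairTail, List.zip_cons_cons, List.map_cons, List.flatten_cons, ih b, List.append_assoc]

theorem loop_eq_go (rest : List Int) : ∀ (a : Int) (pre : List Int) (acc : List (List Char)),
    (DashInsertLoop (pre ++ a :: rest)
      (PySem.List.pyRange pre.length ((pre ++ a :: rest).length : Int) 1) acc).flatten
    = acc.flatten ++ PySem.Int.toChars a ++ (((a :: rest).zip rest).map fun p => DashInsertSep p.1 p.2 ++ PySem.Int.toChars p.2).flatten := by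
  induction rest with
  | nil =>
    intro a pre acc
    rw [PySem.List.pyRange_one_cons (by simp only [List.length_append, List.length_cons, List.length_nil]; push_cast; omega)]
    simp only [DashInsertLoop, PySem.List.len_eq, PySem.List.pyGetD_natCast]
    rw [if_pos (by simp only [List.length_append, List.length_cons, List.length_nil]; push_cast; omega)]
    simp [List.flatten_append]
  | cons b rest' ih =>
    intro a pre acc
    rw [PySem.List.pyRange_one_cons (by simp only [List.length_append, List.length_cons]; push_cast; omega)]
    simp only [DashInsertLoop, PySem.List.len_eq, PySem.List.pyGetD_natCast]
    rw [if_neg (by simp only [List.length_append, List.length_cons]; push_cast; omega)]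
    have hget : (pre ++ a :: b :: rest').getD pre.length 0 = a := by
      simp
    have hget1 : PySem.List.pyGetD (pre ++ a :: b :: rest') ((pre.length : Int) + 1) 0 = b := by
      have : (pre.length : Int) + 1 = ((pre.length + 1 : Nat) : Int) := by push_cast; ring
      rw [this, PySem.List.pyGetD_natCast]
      simp
    have hre : ∀ acc2 : List (List Char),
        (DashInsertLoop (pre ++ a :: b :: rest')
          (PySem.List.pyRange ((pre.length : Int) + 1) ((pre ++ a :: b :: rest').length : Int) 1) acc2).flatten
        = acc2.flatten ++ PySem.Int.toChars b ++ (((b :: rest').zip rest').map fun p => DashInsertSep p.1 p.2 ++ PySem.Int.toChars p.2).flatten := by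
      intro acc2
      have hl : pre ++ a :: b :: rest' = (pre ++ [a]) ++ b :: rest' := by simp
      have hlen : (pre.length : Int) + 1 = ((pre ++ [a]).length : Int) := by simp
      rw [hlen, hl]
      exact ih b (pre ++ [a]) acc2
    rw [hget, hget1]
    have hea := PySem.Int.mod_eq_emod_of_pos (a := a) (b := 2) (by norm_num)
    have heb := PySem.Int.mod_eq_emod_of_pos (a := b) (b := 2) (by norm_num)
    rcases PySem.Int.mod_two_eq a with ha | ha <;> rcases PySem.Int.mod_two_eq b with hb | hb
    · have h1 : (2:Int) ∣ a := (PySem.Int.mod_eq_zero_iff_dvd a 2).mp ha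
      have h2 : (2:Int) ∣ b := (PySem.Int.mod_eq_zero_iff_dvd b 2).mp hb
      simp only [ha, hb, reduceIte]
      rw [hre]
      simp [DashInsertSep, h1, h2, List.flatten_append, List.append_assoc]
    · have h2 : ¬ (2:Int) ∣ b := by rw [← PySem.Int.mod_eq_zero_iff_dvd]; omega
      have h3 : a % 2 ≠ 1 := by omega
      simp only [ha, hb, reduceIte, one_ne_zero]
      rw [hre]
      simp [DashInsertSep, h2, h3, List.flatten_append, List.append_assoc]
    · have h1 : ¬ (2:Int) ∣ a := by rw [← PySem.Int.mod_eq_zero_iff_dvd]; omega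
      have h3 : b % 2 ≠ 1 := by omega
      simp only [ha, hb, reduceIte, one_ne_zero]
      rw [hre]
      simp [DashInsertSep, h1, h3, List.flatten_append, List.append_assoc]
    · have h1 : ¬ (2:Int) ∣ a := by rw [← PySem.Int.mod_eq_zero_iff_dvd]; omega
      have h4 : a % 2 = 1 := by omega
      have h5 : b % 2 = 1 := by omega
      simp only [ha, hb, reduceIte, one_ne_zero]
      rw [hre]
      simp [DashInsertSep, h1, h4, h5, List.flatten_append, List.append_assoc]

-- the whole string rendered from a list of runs
def renderRuns (runs : List (List Int)) : List Char :=
  (runs.map DashInsertRunStr).flatten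

theorem pyGetD_zero (r : List Int) (d : Int) : PySem.List.pyGetD r 0 d = r.getD 0 d := by
  have : (0 : Int) = ((0 : Nat) : Int) := rfl
  rw [this, PySem.List.pyGetD_natCast]

theorem join_concat (sep : List Char) (x y : List Char) (xs : List (List Char)) :
    PySem.Chars.join sep ((x :: xs) ++ [y]) = PySem.Chars.join sep (x :: xs) ++ sep ++ y := by
  induction xs generalizing x with
  | nil => simp [PySem.Chars.join_cons_cons, PySem.Chars.join_singleton]
  | cons z zs ih =>
    have h2 := ih z
    simp only [List.cons_append] at h2 ⊢
    rw [PySem.Chars.join_cons_cons, PySem.Chars.join_cons_cons, h2]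
    simp [List.append_assoc]

theorem runStr_extend (h : Int) (t : List Int) (n l : Int)
    (hpar : PySem.Int.mod l 2 = PySem.Int.mod n 2)
    (hlh : PySem.Int.mod l 2 = PySem.Int.mod h 2) :
    DashInsertRunStr ((h :: t) ++ [n]) = DashInsertRunStr (h :: t) ++ DashInsertSep l n ++ PySem.Int.toChars n := by
  have hhead : PySem.List.pyGetD ((h :: t) ++ [n]) 0 0 = h := by rw [pyGetD_zero]; rfl
  have hhead2 : PySem.List.pyGetD (h :: t) 0 0 = h := by rw [pyGetD_zero]; rfl
  simp only [DashInsertRunStr, hhead, hhead2, List.map_append, List.map_cons, List.map_nil]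
  rw [join_concat]
  rcases PySem.Int.mod_two_eq h with hh | hh
  · have hl0 : PySem.Int.mod l 2 = 0 := by rw [hlh, hh]
    have hn0 : PySem.Int.mod n 2 = 0 := by rw [← hpar, hl0]
    have hdh : (2:Int) ∣ h := (PySem.Int.mod_eq_zero_iff_dvd h 2).mp hh
    have hdl : (2:Int) ∣ l := (PySem.Int.mod_eq_zero_iff_dvd l 2).mp hl0
    have hdn : (2:Int) ∣ n := (PySem.Int.mod_eq_zero_iff_dvd n 2).mp hn0
    simp [DashInsertSep, hdh, hdl, hdn, List.append_assoc]
  · have hl1 : PySem.Int.mod l 2 = 1 := by rw [hlh, hh]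
    have hn1 : PySem.Int.mod n 2 = 1 := by rw [← hpar, hl1]
    have hndh : ¬ (2:Int) ∣ h := by rw [← PySem.Int.mod_eq_zero_iff_dvd, hh]; decide
    have hndl : ¬ (2:Int) ∣ l := by rw [← PySem.Int.mod_eq_zero_iff_dvd, hl1]; decide
    have hel : l % 2 = 1 := by rw [← PySem.Int.mod_eq_emod_of_pos (by norm_num : (0:Int) < 2)]; exact hl1
    have hen : n % 2 = 1 := by rw [← PySem.Int.mod_eq_emod_of_pos (by norm_num : (0:Int) < 2)]; exact hn1
    simp [DashInsertSep, hndh, hel, hen, List.append_assoc]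

theorem runs_render (ns : List Int) : ∀ (runs : List (List Int)) (r : List Int) (h l : Int),
    r.head? = some h → r.getLast? = some l → PySem.Int.mod l 2 = PySem.Int.mod h 2 →
    renderRuns (List.foldl DashInsertStep (runs ++ [r]) ns)
      = renderRuns (runs ++ [r]) ++ pairTail l ns := by
  induction ns with
  | nil => intro runs r h l _ _ _; simp [pairTail]
  | cons n ns' ih =>
    intro runs r h l hh hl hpar
    obtain ⟨t, rfl⟩ : ∃ t, r = h :: t := by
      cases r with
      | nil => simp at hh
      | cons a b =>
        have ha : a = h := by simpa using hh
        exact ⟨b, by rw [ha]⟩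
    rw [List.foldl_cons]
    have hstepLast : (runs ++ [h :: t]).getLastD [] = h :: t := by simp
    have hrl : (h :: t).getLastD 0 = l := by
      rw [List.getLastD_eq_getLast?, hl]; rfl
    by_cases hp : PySem.Int.mod l 2 = PySem.Int.mod n 2
    · have hstep : DashInsertStep (runs ++ [h :: t]) n = runs ++ [(h :: t) ++ [n]] := by
        simp only [DashInsertStep]
        rw [if_pos ⟨by simp, by rw [hstepLast, hrl]; exact hp⟩]
        simp
      rw [hstep]
      rw [ih runs ((h :: t) ++ [n]) h n rfl List.getLast?_concat (by rw [← hp]; exact hpar)]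
      have hext := runStr_extend h t n l hp hpar
      simp only [renderRuns, List.map_append, List.map_cons, List.map_nil,
        List.flatten_append, List.flatten_cons, List.flatten_nil, hext, pairTail,
        List.append_assoc, List.append_nil]
    · have hstep : DashInsertStep (runs ++ [h :: t]) n = (runs ++ [h :: t]) ++ [[n]] := by
        simp only [DashInsertStep]
        rw [if_neg]
        rintro ⟨-, hc⟩
        rw [hstepLast, hrl] at hc
        exact hp hc
      rw [hstep]
      rw [ih (runs ++ [h :: t]) [n] n n rfl rfl rfl]
      have hsep : DashInsertSep l n = [] := by
        rcases PySem.Int.mod_two_eq l with h1 | h1 <;> rcases PySem.Int.mod_two_eq n with h2 | h2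
        · exact absurd (h1.trans h2.symm) hp
        · have hndn : ¬ (2:Int) ∣ n := by rw [← PySem.Int.mod_eq_zero_iff_dvd, h2]; decide
          have hel : l % 2 = 0 := by rw [← PySem.Int.mod_eq_emod_of_pos (by norm_num : (0:Int) < 2)]; exact h1
          simp [DashInsertSep, hndn, hel]
        · have hndl : ¬ (2:Int) ∣ l := by rw [← PySem.Int.mod_eq_zero_iff_dvd, h1]; decide
          have hen : n % 2 = 0 := by rw [← PySem.Int.mod_eq_emod_of_pos (by norm_num : (0:Int) < 2)]; exact h2
          simp [DashInsertSep, hndl, hen]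
        · exact absurd (h1.trans h2.symm) hp
      have hrun1 : DashInsertRunStr [n] = PySem.Int.toChars n := by
        simp [DashInsertRunStr, PySem.Chars.join_singleton]
      simp only [renderRuns, List.map_append, List.map_cons, List.map_nil,
        List.flatten_append, List.flatten_cons, List.flatten_nil, hrun1, pairTail, hsep,
        List.append_assoc, List.nil_append, List.append_nil]

-- ===== VERDICT =====
theorem DashInsert_spec : Claim_equal_DashInsert := by
  intro numbers _
  unfold Spec_DashInsert
  cases numbers with
  | nil => rfl
  | cons x xs =>
    simp only [DashInsert, DashInsert_alt, joinNil, DashInsertRuns]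
    refine congrArg String.ofList ?_
    have hA := loop_eq_go xs x [] []
    simp only [List.nil_append, List.flatten_nil] at hA
    have hstep0 : DashInsertStep [] x = [[x]] := by simp [DashInsertStep]
    have hB := runs_render xs [] [x] x x rfl rfl rfl
    simp only [List.nil_append] at hB
    rw [List.foldl_cons, hstep0]
    show _ = renderRuns (List.foldl DashInsertStep [[x]] xs)
    rw [hB]
    have h1 : renderRuns [[x]] = PySem.Int.toChars x := by
      simp [renderRuns, DashInsertRunStr, PySem.Chars.join_singleton]
    rw [h1, pairTail_eq_zip]
    simpa using hA
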